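-- pv_equiv track=rewrite | github.com/Patxi91/CodeWars_Cloud | 6kyu-Euler Squares-Patxi.py | create_euler_square
-- ===== SOURCE A (Python) =====
-- def create_euler_square(n):
--     latin_square1 = []
--     latin_square2 = []
--
--     for i in range(n):
--         row1 = []
--         row2 = []
--         for j in range(n):
--             row1.append((j + i) % n + 1)
--             row2.append((j + 2 * i) % n + 1)
--         latin_square1.append(row1)
--         latin_square2.append(row2)
--
--     return latin_square1, latin_square2
-- ===== SOURCE B (Python) =====
-- def create_euler_square(n):
--     base = list(range(1, n + 1))
--     square1 = []
--     square2 = []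
--     for i in range(n):
--         k1 = i % n
--         k2 = (2 * i) % n
--         square1.append(base[k1:] + base[:k1])
--         square2.append(base[k2:] + base[:k2])
--     return square1, square2
-- ===== Notes on version B (the rewrite author's own statement) =====
-- stated objective: idiomatic
-- what changed: B precomputes the base row 1..n once and builds each row as a slice rotation base[k:]+base[:k] instead of recomputing every cell with per-cell modular arithmetic in an inner loop.
import Mathlib
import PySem

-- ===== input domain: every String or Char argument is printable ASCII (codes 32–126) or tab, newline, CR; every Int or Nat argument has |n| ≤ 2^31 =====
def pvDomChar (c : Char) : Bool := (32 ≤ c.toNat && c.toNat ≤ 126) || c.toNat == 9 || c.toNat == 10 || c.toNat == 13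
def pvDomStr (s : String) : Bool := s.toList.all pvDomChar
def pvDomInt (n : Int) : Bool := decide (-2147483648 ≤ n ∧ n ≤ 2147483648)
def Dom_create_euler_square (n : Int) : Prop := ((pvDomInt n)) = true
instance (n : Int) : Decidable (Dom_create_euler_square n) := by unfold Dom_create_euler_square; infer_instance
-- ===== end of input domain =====

-- B builds each row by slicing a precomputed base row instead of an inner per-cell modular loop (idiomatic decomposition).

-- ===== PORT A =====
def create_euler_square (n : Int) : List (List Int) × List (List Int) :=
  (PySem.List.pyRange 0 n 1).foldl
    (fun (st : List (List Int) × List (List Int)) i =>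
      let row1 := (PySem.List.pyRange 0 n 1).foldl
        (fun r j => r ++ [PySem.Int.mod (j + i) n + 1]) []
      let row2 := (PySem.List.pyRange 0 n 1).foldl
        (fun r j => r ++ [PySem.Int.mod (j + 2 * i) n + 1]) []
      (st.1 ++ [row1], st.2 ++ [row2]))
    ([], [])

-- ===== PORT B =====
def create_euler_square_alt (n : Int) : List (List Int) × List (List Int) :=
  let base := PySem.List.pyRange 1 (n + 1) 1
  (PySem.List.pyRange 0 n 1).foldl
    (fun (st : List (List Int) × List (List Int)) i =>
      let k1 := PySem.Int.mod i n
      let k2 := PySem.Int.mod (2 * i) n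
      (st.1 ++ [PySem.List.slice base (some k1) none ++ PySem.List.slice base none (some k1)],
       st.2 ++ [PySem.List.slice base (some k2) none ++ PySem.List.slice base none (some k2)]))
    ([], [])

-- ===== PRECONDITION & SPEC =====
def Spec_create_euler_square (n : Int) (out : List (List Int) × List (List Int)) : Prop := out = create_euler_square_alt n
instance (n : Int) (out : List (List Int) × List (List Int)) : Decidable (Spec_create_euler_square n out) := by unfold Spec_create_euler_square; infer_instance

-- ===== CLAIM (what is proved, stated in full; the proofs are below) =====
def Claim_equal_create_euler_square : Prop := ∀ (n : Int), Dom_create_euler_square n → Spec_create_euler_square n (create_euler_square n)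

-- ===== LEMMAS AND PROOFS =====

-- Rotation lemma: A's inner per-cell modular row equals B's slice rotation of the base row, for a shift 0 ≤ k < n.
theorem row_rotation (n k : Int) (hk0 : 0 ≤ k) (hkn : k < n) :
    (PySem.List.pyRange 0 n 1).map (fun j => PySem.Int.mod (j + k) n + 1) =
    PySem.List.slice (PySem.List.pyRange 1 (n + 1) 1) (some k) none ++
      PySem.List.slice (PySem.List.pyRange 1 (n + 1) 1) none (some k) := by
  have hn : 0 < n := lt_of_le_of_lt hk0 hkn
  rw [PySem.List.slice_from _ hk0, PySem.List.slice_to _ hk0]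
  rw [PySem.List.pyRange_one 0 n, PySem.List.pyRange_one 1 (n + 1)]
  have hkt : (k.toNat : Int) = k := Int.toNat_of_nonneg hk0
  have hklen : k.toNat ≤ (n + 1 - 1).toNat := by omega
  apply List.ext_getElem
  · simp
    omega
  · intro m h1 h2
    simp only [List.getElem_map, List.getElem_range, List.getElem_append, List.length_drop,
      List.length_map, List.length_range, List.getElem_drop, List.getElem_take, zero_add]
    have hmn : (m : Int) < n := by simp at h1; omega
    rw [PySem.Int.mod_eq_emod_of_pos hn]
    split_ifs with hc
    · have : ((m:Int) + k) % n = (m:Int) + k := by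
        apply Int.emod_eq_of_lt (by omega) (by omega)
      rw [this]
      push_cast
      omega
    · have : ((m:Int) + k) % n = (m:Int) + k - n := by
        rw [← Int.sub_emod_right ((m:Int) + k) n]
        apply Int.emod_eq_of_lt (by omega) (by omega)
      rw [this]
      omega

-- A's inner foldl-append row is the map over the range.
theorem rowA_eq_map (n c : Int) :
    (PySem.List.pyRange 0 n 1).foldl (fun r j => r ++ [PySem.Int.mod (j + c) n + 1]) [] =
    (PySem.List.pyRange 0 n 1).map (fun j => PySem.Int.mod (j + c) n + 1) := by
  simpa using PySem.List.foldl_append_singleton_eq_map (fun j => PySem.Int.mod (j + c) n + 1) (PySem.List.pyRange 0 n 1) []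

theorem create_euler_square_spec : Claim_equal_create_euler_square := by
  intro n _
  unfold Spec_create_euler_square create_euler_square create_euler_square_alt
  apply PySem.List.foldl_congr_mem
  intro st i hi
  have hi' : 0 ≤ i ∧ i < n := by
    have := (PySem.List.mem_pyRange_one (x := i) (a := 0) (b := n)).1 hi
    omega
  have hn : 0 < n := lt_of_le_of_lt hi'.1 hi'.2
  have hk1 : PySem.Int.mod i n = i := by
    rw [PySem.Int.mod_eq_emod_of_pos hn]; exact Int.emod_eq_of_lt hi'.1 hi'.2
  have hk2a : 0 ≤ PySem.Int.mod (2 * i) n := PySem.Int.mod_nonneg _ hn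
  have hk2b : PySem.Int.mod (2 * i) n < n := PySem.Int.mod_lt _ hn
  have hrow2 : ∀ j : Int, PySem.Int.mod (j + 2 * i) n = PySem.Int.mod (j + PySem.Int.mod (2 * i) n) n := by
    intro j
    simp only [PySem.Int.mod_eq_emod_of_pos hn]
    conv_rhs => rw [Int.add_emod]
    rw [Int.emod_emod_of_dvd _ dvd_rfl, ← Int.add_emod]
  simp only [rowA_eq_map]
  congr 1
  · rw [show (fun j => PySem.Int.mod (j + i) n + 1) = (fun j => PySem.Int.mod (j + PySem.Int.mod i n) n + 1) by
      funext j; rw [hk1]]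
    rw [row_rotation n (PySem.Int.mod i n) (by rw [hk1]; exact hi'.1) (by rw [hk1]; exact hi'.2)]
  · rw [show (fun j => PySem.Int.mod (j + 2 * i) n + 1) = (fun j => PySem.Int.mod (j + PySem.Int.mod (2 * i) n) n + 1) by
      funext j; rw [hrow2 j]]
    rw [row_rotation n (PySem.Int.mod (2 * i) n) hk2a hk2b]
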